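-- pv_equiv track=rewrite | github.com/kkowenn/algorirhm-design | chatQuestion/Q3chat.py | find_min_max_load
-- ===== SOURCE A (Python) =====
-- def can_distribute(tasks, capacities, max_load):
--     # Function to check if all tasks can be distributed such that
--     # no server exceeds the max_load
--     i = 0  # Task index
--     for capacity in capacities:
--         current_load = 0
--         while i < len(tasks) and current_load + tasks[i] <= min(capacity, max_load):
--             current_load += tasks[i]
--             i += 1
--     return i == len(tasks)  # True if all tasks are distributed
--
-- def find_min_max_load(capacities, tasks):
--     left, right = max(tasks), sum(tasks)  # Minimum and maximum possible max load
--     result = right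
--     while left <= right:
--         mid = (left + right) // 2
--         if can_distribute(tasks, capacities, mid):
--             result = min(result, mid)
--             right = mid - 1
--         else:
--             left = mid + 1
--     return result
-- ===== SOURCE B (Python) =====
-- def find_min_max_load(capacities, tasks):
--     # Recursive divide-and-conquer binary search; greedy check consumes the
--     # remaining tasks as a suffix (kept reversed so pop() takes the next task).
--     def can_distribute(max_load):
--         rest = tasks[::-1]
--         for cap in capacities:
--             limit = min(cap, max_load)
--             load = 0
--             while rest and load + rest[-1] <= limit:
--                 load += rest.pop()
--         return not rest
--
--     def go(lo, hi, best):
--         if lo > hi: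
--             return best
--         mid = (lo + hi) // 2
--         if can_distribute(mid):
--             return go(lo, mid - 1, mid)
--         return go(mid + 1, hi, best)
--
--     hi0 = sum(tasks)
--     return go(max(tasks), hi0, hi0)
-- ===== Notes on version B (the rewrite author's own statement) =====
-- stated objective: alternative
-- what changed: Iterative while-loop binary search with an indexed greedy check is replaced by a recursive divide-and-conquer search whose greedy feasibility check consumes a task-suffix list, carrying mid directly as the best instead of min(result, mid).
import Mathlib
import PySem

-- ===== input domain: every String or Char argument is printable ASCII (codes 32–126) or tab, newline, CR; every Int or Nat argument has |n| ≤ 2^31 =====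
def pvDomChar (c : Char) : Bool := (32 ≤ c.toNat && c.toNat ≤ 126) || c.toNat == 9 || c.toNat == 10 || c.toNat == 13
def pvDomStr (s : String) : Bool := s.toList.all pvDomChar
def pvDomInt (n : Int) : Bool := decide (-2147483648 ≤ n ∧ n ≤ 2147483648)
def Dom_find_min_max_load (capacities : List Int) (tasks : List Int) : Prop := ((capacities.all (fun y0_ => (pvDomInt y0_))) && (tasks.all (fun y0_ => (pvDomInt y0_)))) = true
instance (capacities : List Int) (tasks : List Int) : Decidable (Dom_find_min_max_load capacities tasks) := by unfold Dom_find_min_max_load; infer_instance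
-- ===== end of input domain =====

-- B replaces the iterative binary search + indexed greedy check by a recursive
-- divide-and-conquer search with a suffix-consuming greedy check (objective: alternative).


-- ===== PORT A =====
-- inner 'while i < len(tasks) and current_load + tasks[i] <= min(capacity, max_load)'
def pvInnerA (tasks : List Int) (cap maxLoad : Int) (cur : Int) (i : Nat) : Nat :=
  if h : i < tasks.length then
    if cur + tasks[i] ≤ min cap maxLoad then
      pvInnerA tasks cap maxLoad (cur + tasks[i]) (i + 1)
    else i
  else i
termination_by tasks.length - i

def pvCanDistributeA (tasks capacities : List Int) (maxLoad : Int) : Bool :=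
  (capacities.foldl (fun i cap => pvInnerA tasks cap maxLoad 0 i) 0) == tasks.length

-- outer 'while left <= right' loop
def pvLoopA (capacities tasks : List Int) (left right result : Int) : Int :=
  if hlr : left ≤ right then
    let mid := PySem.Int.floordiv (left + right) 2
    if pvCanDistributeA tasks capacities mid then
      pvLoopA capacities tasks left (mid - 1) (min result mid)
    else
      pvLoopA capacities tasks (mid + 1) right result
  else result
termination_by (right - left + 1).toNat
decreasing_by
  · have := (PySem.Int.floordiv_two_mid_bounds hlr)
    simp only [mid] at *; omega
  · have := (PySem.Int.floordiv_two_mid_bounds hlr)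
    simp only [mid] at *; omega

def find_min_max_load (capacities : List Int) (tasks : List Int) : Int :=
  match PySem.List.max? tasks (fun y => y) with
  | none => 0   -- unreachable under Pre_ (Python raises ValueError on max([]))
  | some mx => pvLoopA capacities tasks mx tasks.sum tasks.sum

-- ===== PORT B =====
-- greedy consumption of a task suffix by one server of limit 'limit'.
-- Source B keeps the suffix reversed and pops from the end; consuming the head of the
-- forward suffix is exactly that sequence of tasks, so this port is exact.
def pvTakeGreedy (limit load : Int) : List Int → List Int
  | [] => []
  | t :: rest => if load + t ≤ limit then pvTakeGreedy limit (load + t) rest else t :: rest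

def pvCanDistributeB (tasks capacities : List Int) (maxLoad : Int) : Bool :=
  (capacities.foldl (fun rest cap => pvTakeGreedy (min cap maxLoad) 0 rest) tasks).isEmpty

def pvGoB (capacities tasks : List Int) (lo hi best : Int) : Int :=
  if hlo : lo ≤ hi then
    let mid := PySem.Int.floordiv (lo + hi) 2
    if pvCanDistributeB tasks capacities mid then
      pvGoB capacities tasks lo (mid - 1) mid
    else
      pvGoB capacities tasks (mid + 1) hi best
  else best
termination_by (hi - lo + 1).toNat
decreasing_by
  · have := (PySem.Int.floordiv_two_mid_bounds hlo)
    simp only [mid] at *; omega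
  · have := (PySem.Int.floordiv_two_mid_bounds hlo)
    simp only [mid] at *; omega

def find_min_max_load_alt (capacities : List Int) (tasks : List Int) : Int :=
  match PySem.List.max? tasks (fun y => y) with
  | none => 0
  | some mx => pvGoB capacities tasks mx tasks.sum tasks.sum

-- ===== PRECONDITION & SPEC =====
-- Pre_ excludes only the empty task list, on which Python's max([]) raises ValueError (in A and in B alike).
def Pre_find_min_max_load (capacities : List Int) (tasks : List Int) : Prop := tasks ≠ []
instance (capacities : List Int) (tasks : List Int) : Decidable (Pre_find_min_max_load capacities tasks) := by unfold Pre_find_min_max_load; infer_instance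
def pvWitness_find_min_max_load : List Int × List Int := ([5, 7], [3, 4, 2])

def Spec_find_min_max_load (capacities : List Int) (tasks : List Int) (out : Int) : Prop := out = find_min_max_load_alt capacities tasks
instance (capacities : List Int) (tasks : List Int) (out : Int) : Decidable (Spec_find_min_max_load capacities tasks out) := by unfold Spec_find_min_max_load; infer_instance

-- ===== CLAIM (what is proved, stated in full; the proofs are below) =====
def Claim_equal_find_min_max_load : Prop := ∀ (capacities : List Int) (tasks : List Int), Dom_find_min_max_load capacities tasks → Pre_find_min_max_load capacities tasks → Spec_find_min_max_load capacities tasks (find_min_max_load capacities tasks)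

-- ===== LEMMAS AND PROOFS =====

-- the indexed inner while-loop of A and B's suffix-consuming greedy agree
theorem pvInnerA_drop (tasks : List Int) (cap maxLoad : Int) :
    ∀ (suf : List Int) (i : Nat) (cur : Int), tasks.drop i = suf → i ≤ tasks.length →
      i ≤ pvInnerA tasks cap maxLoad cur i ∧
      pvInnerA tasks cap maxLoad cur i ≤ tasks.length ∧
      tasks.drop (pvInnerA tasks cap maxLoad cur i) =
        pvTakeGreedy (min cap maxLoad) cur (tasks.drop i) := by
  intro suf
  induction suf with
  | nil =>
    intro i cur hd hi
    have hlen : tasks.length ≤ i := by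
      have := List.drop_eq_nil_iff.mp hd; omega
    rw [pvInnerA]
    simp [Nat.not_lt.mpr hlen, hd, pvTakeGreedy, hi]
  | cons t rest ih =>
    intro i cur hd hi
    have hilt : i < tasks.length := by
      by_contra h
      rw [List.drop_eq_nil_iff.mpr (by omega)] at hd; simp at hd
    have hget : tasks[i] = t := by
      have : (tasks.drop i)[0]'(by rw [hd]; simp) = t := by simp [hd]
      simpa using this
    have hd1 : tasks.drop (i + 1) = rest := by
      have h2 : (tasks.drop i).tail = rest := by rw [hd]; rfl
      rwa [List.tail_drop] at h2
    rw [pvInnerA]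
    rw [hd, pvTakeGreedy]
    simp only [hilt, dif_pos, hget]
    by_cases hc : cur + t ≤ min cap maxLoad
    · simp only [if_pos hc]
      have h3 := ih (i + 1) (cur + t) hd1 (by omega)
      refine ⟨by omega, h3.2.1, ?_⟩
      rw [h3.2.2, hd1]
    · simp only [if_neg hc]
      exact ⟨le_rfl, by omega, hd⟩

theorem pvFold_inv (tasks : List Int) (maxLoad : Int) :
    ∀ (caps : List Int) (i : Nat), i ≤ tasks.length →
      (caps.foldl (fun i cap => pvInnerA tasks cap maxLoad 0 i) i) ≤ tasks.length ∧
      caps.foldl (fun rest cap => pvTakeGreedy (min cap maxLoad) 0 rest) (tasks.drop i) =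
        tasks.drop (caps.foldl (fun i cap => pvInnerA tasks cap maxLoad 0 i) i) := by
  intro caps
  induction caps with
  | nil => intro i hi; exact ⟨hi, rfl⟩
  | cons cap caps ih =>
    intro i hi
    have h := pvInnerA_drop tasks cap maxLoad (tasks.drop i) i 0 rfl hi
    simp only [List.foldl_cons]
    rw [show pvTakeGreedy (min cap maxLoad) 0 (tasks.drop i)
        = tasks.drop (pvInnerA tasks cap maxLoad 0 i) from h.2.2.symm]
    exact ih _ h.2.1

theorem pvCan_eq (tasks capacities : List Int) (maxLoad : Int) :
    pvCanDistributeA tasks capacities maxLoad = pvCanDistributeB tasks capacities maxLoad := by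
  unfold pvCanDistributeA pvCanDistributeB
  obtain ⟨hle, heq⟩ := pvFold_inv tasks maxLoad capacities 0 (by omega)
  rw [List.drop_zero] at heq
  rw [heq]
  by_cases h : List.foldl (fun i cap => pvInnerA tasks cap maxLoad 0 i) 0 capacities = tasks.length
  · rw [h]; simp
  · have h1 : (List.foldl (fun i cap => pvInnerA tasks cap maxLoad 0 i) 0 capacities
        == tasks.length) = false := beq_eq_false_iff_ne.mpr h
    have h2 : (tasks.drop (List.foldl (fun i cap => pvInnerA tasks cap maxLoad 0 i) 0 capacities)).isEmpty = false := by
      simp only [List.isEmpty_eq_false_iff, ne_eq, List.drop_eq_nil_iff]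
      omega
    rw [h1, h2]

theorem pvLoop_eq_go (capacities tasks : List Int) :
    ∀ (l r res : Int), r ≤ res →
      pvLoopA capacities tasks l r res = pvGoB capacities tasks l r res := by
  have key : ∀ (n : Nat) (l r res : Int), (r - l + 1).toNat ≤ n → r ≤ res →
      pvLoopA capacities tasks l r res = pvGoB capacities tasks l r res := by
    intro n
    induction n with
    | zero =>
      intro l r res hn hres
      have : ¬ l ≤ r := by omega
      rw [pvLoopA, pvGoB]
      simp [this]
    | succ n ih =>
      intro l r res hn hres
      rw [pvLoopA, pvGoB]
      by_cases hlr : l ≤ r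
      · simp only [hlr, dif_pos]
        have hmid := PySem.Int.floordiv_two_mid_bounds hlr
        rw [pvCan_eq]
        by_cases hc : pvCanDistributeB tasks capacities (PySem.Int.floordiv (l + r) 2) = true
        · rw [if_pos hc, if_pos hc]
          rw [show min res (PySem.Int.floordiv (l + r) 2) = PySem.Int.floordiv (l + r) 2 by
            omega]
          exact ih l (PySem.Int.floordiv (l + r) 2 - 1) _ (by omega) (by omega)
        · rw [if_neg hc, if_neg hc]
          exact ih (PySem.Int.floordiv (l + r) 2 + 1) r res (by omega) hres
      · simp [hlr]
  intro l r res hres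
  exact key (r - l + 1).toNat l r res le_rfl hres

-- ===== VERDICT (by name: the statement is the Claim_ definition above) =====
theorem find_min_max_load_spec : Claim_equal_find_min_max_load := by
  intro capacities tasks _ _
  unfold Spec_find_min_max_load find_min_max_load find_min_max_load_alt
  cases PySem.List.max? tasks (fun y => y) with
  | none => rfl
  | some mx => exact pvLoop_eq_go capacities tasks mx tasks.sum tasks.sum le_rfl
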